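-- pv_equiv track=rewrite | github.com/matuszsmig/algorithms-and-data-structures | blok2/dynamiczne/zad5szymon.py | garek
-- ===== SOURCE A (Python) =====
-- def rek(A,i,j,Tab):
--     if Tab[i][j] is not None:
--         return Tab[i][j]
--     if j <= i:
--         return 0
--     maxx = max(min(rek(A,i+2,j,Tab)+A[i],rek(A,i+1,j-1,Tab)+A[i]),min(rek(A,i,j-2,Tab)+A[j],rek(A,i+1,j-1,Tab)+A[j]))
--     Tab[i][j]=maxx
--     return Tab[i][j]
--
-- def garek ( A ):
--     n = len(A)
--     Tab = [[None for _ in range(n+1)]for _ in range(n+1)]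
--     maxx = 0
--     j = n-1
--     for i in range(n):
--         maxx = max(maxx,rek(A,i,j,Tab))
--     return maxx
-- ===== SOURCE B (Python) =====
-- def garek(A):
--     n = len(A)
--     f = {}
--     for gap in range(1, n):
--         for i in range(n - gap):
--             j = i + gap
--             mid = f.get((i + 1, j - 1), 0)
--             f[(i, j)] = max(min(f.get((i + 2, j), 0) + A[i], mid + A[i]),
--                             min(f.get((i, j - 2), 0) + A[j], mid + A[j]))
--     best = 0
--     for i in range(n):
--         best = max(best, f.get((i, n - 1), 0))
--     return best
-- ===== Notes on version B (the rewrite author's own statement) =====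
-- stated objective: alternative
-- what changed: Replaced A's memoized top-down recursion (mutating an (n+1)x(n+1) None-table) by a bottom-up iterative interval DP that fills a dictionary by increasing gap length; same recurrence, no recursion.
import Mathlib
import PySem

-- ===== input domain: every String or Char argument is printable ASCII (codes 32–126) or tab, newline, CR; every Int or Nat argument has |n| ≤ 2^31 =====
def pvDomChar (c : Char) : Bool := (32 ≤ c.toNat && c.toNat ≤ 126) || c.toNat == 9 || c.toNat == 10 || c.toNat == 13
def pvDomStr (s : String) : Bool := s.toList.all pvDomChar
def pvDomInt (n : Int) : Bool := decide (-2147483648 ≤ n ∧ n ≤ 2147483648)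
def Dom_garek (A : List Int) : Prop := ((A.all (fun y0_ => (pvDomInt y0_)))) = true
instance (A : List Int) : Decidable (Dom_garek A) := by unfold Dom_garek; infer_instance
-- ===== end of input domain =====

-- B replaces A's memoized top-down recursion by a bottom-up interval DP filling the table
-- iteratively by gap length (same recurrence, different decomposition); objective: alternative.

-- ===== PORT A =====
-- Python's Tab is an (n+1)x(n+1) list of None; it is represented as a Dict keyed by (i,j)
-- (absent key = None), threaded through the recursion like the mutated Tab.  The only
-- negative index ever used is Tab[i][-1] (when j-2 = -1), which in Python wraps to column n,
-- a cell never written, hence always None — exactly like the absent key (i,-1) here.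
-- A[i]/A[j] are only read with 0 ≤ i < j < len(A), so pyGetD with default 0 is exact.
def rekA (A : List Int) (i j : Int) (tab : PySem.Dict (Int × Int) Int) :
    Int × PySem.Dict (Int × Int) Int :=
  match tab.get? (i, j) with
  | some v => (v, tab)
  | none =>
    if _h : j ≤ i then (0, tab)
    else
      let p1 := rekA A (i+2) j tab
      let p2 := rekA A (i+1) (j-1) p1.2
      let p3 := rekA A i (j-2) p2.2
      let p4 := rekA A (i+1) (j-1) p3.2
      let ai := PySem.List.pyGetD A i 0
      let aj := PySem.List.pyGetD A j 0
      let m := max (min (p1.1 + ai) (p2.1 + ai)) (min (p3.1 + aj) (p4.1 + aj))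
      (m, p4.2.insert (i, j) m)
termination_by (j - i).toNat
decreasing_by all_goals omega

def garek (A : List Int) : Int :=
  let n : Int := A.length
  let res := (PySem.List.pyRange 0 n 1).foldl
    (fun (st : Int × PySem.Dict (Int × Int) Int) i =>
      let p := rekA A i (n - 1) st.2
      (max st.1 p.1, p.2))
    (0, PySem.Dict.empty)
  res.1

-- ===== PORT B =====
def garek_alt (A : List Int) : Int :=
  let n : Int := A.length
  let f := (PySem.List.pyRange 1 n 1).foldl
    (fun f gap =>
      (PySem.List.pyRange 0 (n - gap) 1).foldl
        (fun f i =>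
          let j := i + gap
          let mid := f.getD (i + 1, j - 1) 0
          let ai := PySem.List.pyGetD A i 0
          let aj := PySem.List.pyGetD A j 0
          f.insert (i, j)
            (max (min (f.getD (i + 2, j) 0 + ai) (mid + ai))
                 (min (f.getD (i, j - 2) 0 + aj) (mid + aj))))
        f)
    PySem.Dict.empty
  (PySem.List.pyRange 0 n 1).foldl (fun best i => max best (f.getD (i, n - 1) 0)) 0

-- ===== PRECONDITION & SPEC =====
def Spec_garek (A : List Int) (out : Int) : Prop := out = garek_alt A
instance (A : List Int) (out : Int) : Decidable (Spec_garek A out) := by unfold Spec_garek; infer_instance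

-- ===== CLAIM (what is proved, stated in full; the proofs are below) =====
def Claim_equal_garek : Prop := ∀ (A : List Int), Dom_garek A → Spec_garek A (garek A)

-- ===== LEMMAS AND PROOFS =====

-- the pure interval recurrence both programs compute
def rekF (A : List Int) (i j : Int) : Int :=
  if j ≤ i then 0
  else
    let ai := PySem.List.pyGetD A i 0
    let aj := PySem.List.pyGetD A j 0
    max (min (rekF A (i+2) j + ai) (rekF A (i+1) (j-1) + ai))
        (min (rekF A i (j-2) + aj) (rekF A (i+1) (j-1) + aj))
termination_by (j - i).toNat
decreasing_by all_goals omega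

-- A-side: coherence of the memo table — every stored value is the recurrence's value
def Coh (A : List Int) (tab : PySem.Dict (Int × Int) Int) : Prop :=
  ∀ p v, tab.get? p = some v → v = rekF A p.1 p.2

theorem rekA_correct_aux (A : List Int) : ∀ (n : Nat) (i j : Int)
    (tab : PySem.Dict (Int × Int) Int), (j - i).toNat ≤ n → Coh A tab →
    (rekA A i j tab).1 = rekF A i j ∧ Coh A (rekA A i j tab).2 := by
  intro n
  induction n with
  | zero =>
    intro i j tab hb h
    have hle : j ≤ i := by omega
    rw [rekA]
    cases hget : tab.get? (i, j) with
    | some v => exact ⟨h _ _ hget, h⟩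
    | none =>
      simp only [hle, dif_pos]
      exact ⟨by rw [rekF, if_pos hle], h⟩
  | succ n ih =>
    intro i j tab hb h
    rw [rekA]
    cases hget : tab.get? (i, j) with
    | some v => exact ⟨h _ _ hget, h⟩
    | none =>
      by_cases hle : j ≤ i
      · simp only [hle, dif_pos]
        exact ⟨by rw [rekF, if_pos hle], h⟩
      · simp only [hle, dif_neg, not_false_iff]
        obtain ⟨e1, c1⟩ := ih (i+2) j tab (by omega) h
        obtain ⟨e2, c2⟩ := ih (i+1) (j-1) _ (by omega) c1
        obtain ⟨e3, c3⟩ := ih i (j-2) _ (by omega) c2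
        obtain ⟨e4, c4⟩ := ih (i+1) (j-1) _ (by omega) c3
        have hm : max (min ((rekA A (i+2) j tab).1 + PySem.List.pyGetD A i 0)
            ((rekA A (i+1) (j-1) (rekA A (i+2) j tab).2).1 + PySem.List.pyGetD A i 0))
            (min ((rekA A i (j-2) (rekA A (i+1) (j-1) (rekA A (i+2) j tab).2).2).1 + PySem.List.pyGetD A j 0)
            ((rekA A (i+1) (j-1) (rekA A i (j-2) (rekA A (i+1) (j-1) (rekA A (i+2) j tab).2).2).2).1 + PySem.List.pyGetD A j 0))
            = rekF A i j := by
          rw [e1, e2, e3, e4]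
          conv_rhs => rw [rekF, if_neg hle]
        refine ⟨hm, ?_⟩
        intro p v hp
        rw [PySem.Dict.get?_insert] at hp
        split at hp
        · rename_i hpe
          subst hpe
          simp only [Option.some.injEq] at hp
          subst hp
          exact hm.symm ▸ rfl
        · exact c4 _ _ hp

theorem rekA_correct (A : List Int) (i j : Int) (tab : PySem.Dict (Int × Int) Int)
    (h : Coh A tab) : (rekA A i j tab).1 = rekF A i j ∧ Coh A (rekA A i j tab).2 :=
  rekA_correct_aux A (j - i).toNat i j tab le_rfl h

theorem gfoldA (A : List Int) (J : Int) : ∀ (l : List Int) (m : Int)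
    (tab : PySem.Dict (Int × Int) Int), Coh A tab →
    (l.foldl (fun st i => let p := rekA A i J st.2; (max st.1 p.1, p.2)) (m, tab)).1
      = l.foldl (fun m i => max m (rekF A i J)) m := by
  intro l
  induction l with
  | nil => intro m tab _; rfl
  | cons x xs ih =>
    intro m tab h
    obtain ⟨e, c⟩ := rekA_correct A x J tab h
    simp only [List.foldl_cons]
    rw [ih _ _ c, e]

-- B-side invariant: every cell the bottom-up fill has reached stores the recurrence's value
-- (g = current gap, i0 = next left endpoint at that gap; keys with b ≤ a are never inserted)
def InvP (A : List Int) (n : Int) (f : PySem.Dict (Int × Int) Int) (g i0 : Int) : Prop :=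
  ∀ a b : Int, (b ≤ a ∨ (0 ≤ a ∧ b < n ∧ (b - a < g ∨ (b - a = g ∧ a < i0)))) →
    f.getD (a, b) 0 = rekF A a b

theorem innerB (A : List Int) (n g : Int) (hg : 1 ≤ g) : ∀ (k : Nat) (i0 : Int)
    (f : PySem.Dict (Int × Int) Int), 0 ≤ i0 → (n - g - i0).toNat ≤ k → InvP A n f g i0 →
    InvP A n ((PySem.List.pyRange i0 (n - g) 1).foldl
      (fun f i =>
        let j := i + g
        let mid := f.getD (i + 1, j - 1) 0
        let ai := PySem.List.pyGetD A i 0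
        let aj := PySem.List.pyGetD A j 0
        f.insert (i, j)
          (max (min (f.getD (i + 2, j) 0 + ai) (mid + ai))
               (min (f.getD (i, j - 2) 0 + aj) (mid + aj)))) f) g (max i0 (n - g)) := by
  intro k
  induction k with
  | zero =>
    intro i0 f hi0 hb hf
    rw [PySem.List.pyRange_one_eq_nil (by omega)]
    have : max i0 (n - g) = i0 := by omega
    rw [this]
    exact hf
  | succ k ih =>
    intro i0 f hi0 hb hf
    by_cases hlt : i0 < n - g
    · rw [PySem.List.pyRange_one_cons hlt]
      simp only [List.foldl_cons]
      have hstep : InvP A n (f.insert (i0, i0 + g)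
          (max (min (f.getD (i0 + 2, i0 + g) 0 + PySem.List.pyGetD A i0 0)
                    (f.getD (i0 + 1, i0 + g - 1) 0 + PySem.List.pyGetD A i0 0))
               (min (f.getD (i0, i0 + g - 2) 0 + PySem.List.pyGetD A (i0 + g) 0)
                    (f.getD (i0 + 1, i0 + g - 1) 0 + PySem.List.pyGetD A (i0 + g) 0)))) g (i0 + 1) := by
        have h1 : f.getD (i0 + 2, i0 + g) 0 = rekF A (i0 + 2) (i0 + g) := hf _ _ (by omega)
        have h2 : f.getD (i0 + 1, i0 + g - 1) 0 = rekF A (i0 + 1) (i0 + g - 1) := hf _ _ (by omega)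
        have h3 : f.getD (i0, i0 + g - 2) 0 = rekF A i0 (i0 + g - 2) := hf _ _ (by omega)
        intro a b hab
        rw [PySem.Dict.getD_insert]
        split
        · rename_i hpe
          rw [Prod.mk.injEq] at hpe
          obtain ⟨ha, hb'⟩ := hpe
          subst ha; subst hb'
          rw [h1, h2, h3]
          conv_rhs => rw [rekF, if_neg (by omega)]
        · rename_i hne
          rw [Prod.mk.injEq] at hne
          apply hf a b
          omega
      have := ih (i0 + 1) _ (by omega) (by omega) hstep
      have hmax : max (i0 + 1) (n - g) = max i0 (n - g) := by omega
      rwa [hmax] at this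
    · rw [PySem.List.pyRange_one_eq_nil (by omega)]
      have : max i0 (n - g) = i0 := by omega
      rw [this]
      exact hf

theorem outerB (A : List Int) (n : Int) : ∀ (k : Nat) (g0 : Int)
    (f : PySem.Dict (Int × Int) Int), 1 ≤ g0 → (n - g0).toNat ≤ k → InvP A n f g0 0 →
    InvP A n ((PySem.List.pyRange g0 n 1).foldl
      (fun f gap =>
        (PySem.List.pyRange 0 (n - gap) 1).foldl
          (fun f i =>
            let j := i + gap
            let mid := f.getD (i + 1, j - 1) 0
            let ai := PySem.List.pyGetD A i 0
            let aj := PySem.List.pyGetD A j 0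
            f.insert (i, j)
              (max (min (f.getD (i + 2, j) 0 + ai) (mid + ai))
                   (min (f.getD (i, j - 2) 0 + aj) (mid + aj)))) f) f) (max g0 n) 0 := by
  intro k
  induction k with
  | zero =>
    intro g0 f hg0 hb hf
    rw [PySem.List.pyRange_one_eq_nil (by omega)]
    have : max g0 n = g0 := by omega
    rw [this]
    exact hf
  | succ k ih =>
    intro g0 f hg0 hb hf
    by_cases hlt : g0 < n
    · rw [PySem.List.pyRange_one_cons hlt]
      simp only [List.foldl_cons]
      have hinner := innerB A n g0 hg0 (n - g0).toNat 0 f le_rfl (by omega) hf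
      have hnext : InvP A n ((PySem.List.pyRange 0 (n - g0) 1).foldl
          (fun f i =>
            let j := i + g0
            let mid := f.getD (i + 1, j - 1) 0
            let ai := PySem.List.pyGetD A i 0
            let aj := PySem.List.pyGetD A j 0
            f.insert (i, j)
              (max (min (f.getD (i + 2, j) 0 + ai) (mid + ai))
                   (min (f.getD (i, j - 2) 0 + aj) (mid + aj)))) f) (g0 + 1) 0 := by
        intro a b hab
        apply hinner a b
        omega
      have := ih (g0 + 1) _ (by omega) (by omega) hnext
      have hmax : max (g0 + 1) n = max g0 n := by omega
      rwa [hmax] at this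
    · rw [PySem.List.pyRange_one_eq_nil (by omega)]
      have : max g0 n = g0 := by omega
      rw [this]
      exact hf

theorem coh_empty (A : List Int) : Coh A PySem.Dict.empty := by
  intro p v hp
  simp [PySem.Dict.get?_empty] at hp

theorem garek_eq_fold (A : List Int) :
    garek A = (PySem.List.pyRange 0 (A.length : Int) 1).foldl
      (fun m i => max m (rekF A i ((A.length : Int) - 1))) 0 := by
  simp only [garek]
  exact gfoldA A ((A.length : Int) - 1) _ 0 PySem.Dict.empty (coh_empty A)

theorem garek_alt_eq_fold (A : List Int) :
    garek_alt A = (PySem.List.pyRange 0 (A.length : Int) 1).foldl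
      (fun m i => max m (rekF A i ((A.length : Int) - 1))) 0 := by
  simp only [garek_alt]
  have hinv0 : InvP A (A.length : Int) PySem.Dict.empty 1 0 := by
    intro a b hab
    rw [PySem.Dict.getD_empty]
    conv_rhs => rw [rekF, if_pos (by omega)]
  have hout := outerB A (A.length : Int) ((A.length : Int) - 1).toNat 1
    PySem.Dict.empty le_rfl le_rfl hinv0
  apply PySem.List.foldl_congr_mem
  intro best i hi
  rw [PySem.List.mem_pyRange_one] at hi
  rw [hout i ((A.length : Int) - 1) (by omega)]

-- ===== VERDICT (by name: the statement is the Claim_ definition above) =====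
theorem garek_spec : Claim_equal_garek := by
  intro A _
  unfold Spec_garek
  rw [garek_eq_fold, garek_alt_eq_fold]
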